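-- pv_equiv track=rewrite | github.com/Largopie/codingtest-study | 프로그래머스/lv2/62048. 멀쩡한 사각형/멀쩡한 사각형.py | solution
-- ===== SOURCE A (Python) =====
-- def solution(w,h):
--     def gcd(a, b):
--         gcd_num = 0
--         for i in range(1, a+1):
--             if a % i == 0 and b % i == 0:
--                 gcd_num = i
--         return gcd_num
--
--     w,h = min(w, h), max(w, h)
--
--     g = gcd(w, h)
--
--     gcd_w = w // g
--     gcd_h = h // g
--
--     not_use = gcd_w*gcd_h - (gcd_w - 1)*(gcd_h - 1)
--     return (w * h) - (not_use * g)
-- ===== SOURCE B (Python) =====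
-- def solution(w, h):
--     # Euclidean algorithm for the gcd, then the closed-form count w*h - (w + h - g).
--     a, b = w, h
--     while b:
--         a, b = b, a % b
--     return w * h - w - h + a
-- ===== Notes on version B (the rewrite author's own statement) =====
-- stated objective: faster
-- what changed: A finds the gcd by scanning every i in 1..min(w,h) for common divisibility and then rebuilds the count through w//g, h//g; B computes the gcd with the Euclidean algorithm and returns the closed form w*h - w - h + gcd(w,h) directly.
import Mathlib
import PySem

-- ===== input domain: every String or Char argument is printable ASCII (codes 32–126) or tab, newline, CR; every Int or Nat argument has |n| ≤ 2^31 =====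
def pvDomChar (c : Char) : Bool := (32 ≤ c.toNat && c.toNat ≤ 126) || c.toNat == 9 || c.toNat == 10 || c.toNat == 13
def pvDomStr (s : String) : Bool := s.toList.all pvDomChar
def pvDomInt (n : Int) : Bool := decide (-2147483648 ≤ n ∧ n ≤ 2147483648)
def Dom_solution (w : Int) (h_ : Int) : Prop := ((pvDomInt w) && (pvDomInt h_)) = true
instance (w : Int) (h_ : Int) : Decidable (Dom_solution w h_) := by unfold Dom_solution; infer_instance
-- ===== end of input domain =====

-- B replaces A's linear trial-division gcd and the w//g, h//g reconstruction by the
-- Euclidean algorithm and the closed form w*h - w - h + gcd(w,h)  (faster: O(log min) vs O(min)).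

-- ===== PORT A =====
-- A's inner helper gcd(a, b): scan i = 1 .. a, remember the last common divisor.
def solutionGcdLoop (a b : Int) : Int :=
  (PySem.List.pyRange 1 (a + 1) 1).foldl
    (fun acc i => if PySem.Int.mod a i = 0 ∧ PySem.Int.mod b i = 0 then i else acc) 0

def solution (w : Int) (h_ : Int) : Int :=
  let w2 := min w h_
  let h2 := max w h_
  let g := solutionGcdLoop w2 h2
  let gcdW := PySem.Int.floordiv w2 g
  let gcdH := PySem.Int.floordiv h2 g
  let notUse := gcdW * gcdH - (gcdW - 1) * (gcdH - 1)
  w2 * h2 - notUse * g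

-- ===== PORT B =====
-- termination measure for the Euclidean loop: |a % b| < |b| when b ≠ 0
theorem pymod_natAbs_lt (a b : Int) (hb : b ≠ 0) :
    (PySem.Int.mod a b).natAbs < b.natAbs := by
  rcases lt_or_gt_of_ne hb with h | h
  · have h1 := PySem.Int.mod_neg_bounds a h
    omega
  · have h1 := PySem.Int.mod_nonneg a h
    have h2 := PySem.Int.mod_lt a h
    omega

-- B's while loop: while b: a, b = b, a % b
def euclid (a b : Int) : Int :=
  if hb : b = 0 then a else euclid b (PySem.Int.mod a b)
termination_by b.natAbs
decreasing_by exact pymod_natAbs_lt a b hb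

def solution_alt (w : Int) (h_ : Int) : Int :=
  w * h_ - w - h_ + euclid w h_

-- ===== PRECONDITION & SPEC =====
-- Exactly the inputs on which A returns: if min(w, h) ≤ 0 the trial-division loop is
-- empty, gcd stays 0 and 'w // g' raises ZeroDivisionError.
def Pre_solution (w : Int) (h_ : Int) : Prop := 0 < w ∧ 0 < h_
instance (w : Int) (h_ : Int) : Decidable (Pre_solution w h_) := by unfold Pre_solution; infer_instance
def pvWitness_solution : Int × Int := (8, 12)

def Spec_solution (w : Int) (h_ : Int) (out : Int) : Prop := out = solution_alt w h_
instance (w : Int) (h_ : Int) (out : Int) : Decidable (Spec_solution w h_ out) := by unfold Spec_solution; infer_instance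

-- ===== CLAIM (what is proved, stated in full; the proofs are below) =====
def Claim_equal_solution : Prop := ∀ (w : Int) (h_ : Int), Dom_solution w h_ → Pre_solution w h_ → Spec_solution w h_ (solution w h_)

-- ===== LEMMAS AND PROOFS =====

-- last-wins fold: if nothing in l satisfies p, the accumulator survives
theorem foldl_lastwins_none {p : Int → Prop} [DecidablePred p] (l : List Int) (acc : Int)
    (h : ∀ x ∈ l, ¬ p x) :
    l.foldl (fun acc i => if p i then i else acc) acc = acc := by
  induction l generalizing acc with
  | nil => rfl
  | cons x xs ih =>
    have hx := h x (List.mem_cons_self)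
    simp only [List.foldl_cons, if_neg hx]
    exact ih acc (fun y hy => h y (List.mem_cons_of_mem _ hy))

-- last-wins fold over a strictly increasing list returns the greatest satisfier g
theorem foldl_lastwins_max {p : Int → Prop} [DecidablePred p] (l : List Int) (acc g : Int)
    (hsort : l.Pairwise (· < ·)) (hg : g ∈ l) (hpg : p g)
    (hub : ∀ x ∈ l, p x → x ≤ g) :
    l.foldl (fun acc i => if p i then i else acc) acc = g := by
  induction l generalizing acc with
  | nil => cases hg
  | cons x xs ih =>
    have hlt : ∀ y ∈ xs, x < y := (List.pairwise_cons.mp hsort).1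
    have hsort' := (List.pairwise_cons.mp hsort).2
    have hub' : ∀ y ∈ xs, p y → y ≤ g := fun y hy hpy => hub y (List.mem_cons_of_mem _ hy) hpy
    by_cases hgx : g ∈ xs
    · simp only [List.foldl_cons]
      exact ih _ hsort' hgx hub'
    · have hgeq : g = x := by
        rcases List.mem_cons.mp hg with h | h
        · exact h
        · exact absurd h hgx
      subst hgeq
      simp only [List.foldl_cons, if_pos hpg]
      refine foldl_lastwins_none xs g (fun y hy hpy => ?_)
      have := hub' y hy hpy
      have := hlt y hy
      omega

-- A's trial-division loop computes Int.gcd for positive a ≤ b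
theorem solutionGcdLoop_eq_gcd (a b : Int) (ha : 0 < a) :
    solutionGcdLoop a b = (Int.gcd a b : Int) := by
  unfold solutionGcdLoop
  have hgpos : 0 < (Int.gcd a b : Int) := by
    have : 0 < Int.gcd a b := Int.gcd_pos_iff.mpr (Or.inl (by omega))
    exact_mod_cast this
  have hgdvda : (Int.gcd a b : Int) ∣ a := Int.gcd_dvd_left a b
  have hgdvdb : (Int.gcd a b : Int) ∣ b := Int.gcd_dvd_right a b
  have hgle : (Int.gcd a b : Int) ≤ a := Int.le_of_dvd ha hgdvda
  refine foldl_lastwins_max _ 0 _ (PySem.List.pairwise_lt_pyRange_one 1 (a + 1)) ?_ ?_ ?_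
  · rw [PySem.List.mem_pyRange_one]; omega
  · exact ⟨(PySem.Int.mod_eq_zero_iff_dvd a _).mpr hgdvda,
           (PySem.Int.mod_eq_zero_iff_dvd b _).mpr hgdvdb⟩
  · intro x hx hpx
    obtain ⟨hxa, hxb⟩ := hpx
    have hdx : x ∣ (Int.gcd a b : Int) := by
      rw [Int.coe_gcd]
      exact dvd_gcd ((PySem.Int.mod_eq_zero_iff_dvd a x).mp hxa)
        ((PySem.Int.mod_eq_zero_iff_dvd b x).mp hxb)
    exact Int.le_of_dvd hgpos hdx

-- B's Euclidean loop computes Int.gcd for nonnegative inputs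
theorem euclid_eq_gcd_aux : ∀ n (a b : Int), b.natAbs = n → 0 ≤ a → 0 ≤ b →
    euclid a b = Int.gcd a b := by
  intro n
  induction n using Nat.strong_induction_on with
  | _ n ih =>
    intro a b hn ha hb
    rw [euclid]
    by_cases hb0 : b = 0
    · simp only [hb0, dite_true]
      simp only [Int.gcd, Int.natAbs_zero, Nat.gcd_zero_right]
      exact (Int.natAbs_of_nonneg ha).symm ▸ rfl
    · rw [dif_neg hb0]
      have hbpos : 0 < b := lt_of_le_of_ne hb (Ne.symm hb0)
      have hmod : PySem.Int.mod a b = a % b := PySem.Int.mod_eq_emod_of_pos hbpos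
      have hmn : (PySem.Int.mod a b).natAbs < n := hn ▸ pymod_natAbs_lt a b hb0
      have hmnn : 0 ≤ PySem.Int.mod a b := PySem.Int.mod_nonneg a hbpos
      rw [ih _ hmn b (PySem.Int.mod a b) rfl hb hmnn]
      rw [hmod]
      -- Int.gcd b (a % b) = Int.gcd a b, via Nat.gcd_rec on natAbs
      have hcast : ((a.natAbs % b.natAbs : Nat) : Int) = a % b := by
        push_cast
        rw [abs_of_nonneg ha, abs_of_nonneg hb]
      have habs : (a % b).natAbs = a.natAbs % b.natAbs := by
        rw [← hcast]; exact Int.natAbs_natCast _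
      unfold Int.gcd
      rw [habs, Nat.gcd_comm a.natAbs, Nat.gcd_rec b.natAbs a.natAbs, Nat.gcd_comm]

theorem euclid_eq_gcd (a b : Int) (ha : 0 ≤ a) (hb : 0 ≤ b) : euclid a b = Int.gcd a b :=
  euclid_eq_gcd_aux b.natAbs a b rfl ha hb

-- ===== VERDICT (by name: the statement is the Claim_ definition above) =====
theorem solution_eq_formula (w h_ : Int) :
    solution w h_ =
      (min w h_) * (max w h_) -
        ((PySem.Int.floordiv (min w h_) (solutionGcdLoop (min w h_) (max w h_)) *
            PySem.Int.floordiv (max w h_) (solutionGcdLoop (min w h_) (max w h_)) -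
          (PySem.Int.floordiv (min w h_) (solutionGcdLoop (min w h_) (max w h_)) - 1) *
            (PySem.Int.floordiv (max w h_) (solutionGcdLoop (min w h_) (max w h_)) - 1)) *
          solutionGcdLoop (min w h_) (max w h_)) := rfl

theorem solution_spec : Claim_equal_solution := by
  intro w h_ _ hpre
  obtain ⟨hw, hh⟩ := hpre
  unfold Spec_solution solution_alt
  rw [solution_eq_formula]
  have hm0 : 0 < min w h_ := by omega
  have hmM : min w h_ ≤ max w h_ := min_le_max
  rw [solutionGcdLoop_eq_gcd _ _ hm0]
  have hgcdwh : (Int.gcd (min w h_) (max w h_) : Int) = (Int.gcd w h_ : Int) := by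
    rcases le_total w h_ with h | h
    · simp [min_eq_left h, max_eq_right h]
    · simp [min_eq_right h, max_eq_left h, Int.gcd_comm]
  set g : Int := (Int.gcd (min w h_) (max w h_) : Int) with hg
  have hgpos : 0 < g := by
    have h1 : 0 < Int.gcd (min w h_) (max w h_) := Int.gcd_pos_iff.mpr (Or.inl (by omega))
    rw [hg]
    exact_mod_cast h1
  have hdm : g ∣ min w h_ := Int.gcd_dvd_left _ _
  have hdM : g ∣ max w h_ := Int.gcd_dvd_right _ _
  rw [PySem.Int.floordiv_eq_ediv_of_pos hgpos, PySem.Int.floordiv_eq_ediv_of_pos hgpos]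
  have hmg : min w h_ / g * g = min w h_ := Int.ediv_mul_cancel hdm
  have hMg : max w h_ / g * g = max w h_ := Int.ediv_mul_cancel hdM
  have heu : euclid w h_ = (Int.gcd w h_ : Int) := euclid_eq_gcd w h_ (by omega) (by omega)
  have hmul : (min w h_) * (max w h_) = w * h_ := by
    rcases le_total w h_ with h | h
    · simp [min_eq_left h, max_eq_right h]
    · simp [min_eq_right h, max_eq_left h, Int.mul_comm]
  have key : (min w h_ / g * (max w h_ / g) -
      (min w h_ / g - 1) * (max w h_ / g - 1)) * g = min w h_ + max w h_ - g := by
    have hexp : (min w h_ / g * (max w h_ / g) -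
        (min w h_ / g - 1) * (max w h_ / g - 1)) * g
        = min w h_ / g * g + max w h_ / g * g - g := by ring
    rw [hexp, hmg, hMg]
  rw [key, heu, ← hgcdwh]
  
  rw [hmul]
  omega
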